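-- pv_equiv track=rewrite | github.com/kmin1231/algorithm_problems | Python3/프로그래머스/0/181831. 특별한 이차원 배열 2/특별한 이차원 배열 2.py | solution
-- ===== SOURCE A (Python) =====
-- def solution(arr):
--     answer = 1
--     count = len(arr)
--     for i in range(count):
--         for j in range(count):
--             if arr[i][j] == arr[j][i]: continue
--             else :
--                 answer = 0
--                 break
--     return answer
-- ===== SOURCE B (Python) =====
-- def solution(arr):
--     transposed = [list(row) for row in zip(*arr, strict=True)]
--     return int(arr == transposed)
-- ===== Notes on version B (the rewrite author's own statement) =====
-- stated objective: idiomatic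
-- what changed: Replaces the nested index loops comparing arr[i][j] with arr[j][i] by building the transpose once with zip(*arr, strict=True) and doing a single whole-matrix equality comparison.
-- outside the precondition, e.g. on solution([[1, 2, 3], [2, 1, 9]]): A returns 1, B returns 0; on solution([[1], []]): A raises IndexError, B raises ValueError
import Mathlib
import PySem

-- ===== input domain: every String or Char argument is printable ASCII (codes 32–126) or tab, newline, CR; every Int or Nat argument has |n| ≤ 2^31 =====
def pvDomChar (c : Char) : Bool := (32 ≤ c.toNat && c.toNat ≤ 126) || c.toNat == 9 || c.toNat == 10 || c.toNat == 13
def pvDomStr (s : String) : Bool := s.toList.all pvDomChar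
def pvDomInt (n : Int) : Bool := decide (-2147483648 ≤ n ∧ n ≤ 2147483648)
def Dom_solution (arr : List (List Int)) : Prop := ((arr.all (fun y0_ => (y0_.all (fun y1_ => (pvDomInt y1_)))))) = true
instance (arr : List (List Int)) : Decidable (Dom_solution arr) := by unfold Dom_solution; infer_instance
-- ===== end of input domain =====

-- B builds the transpose once (zip(*arr)) and compares whole matrices, instead of A's nested index loops.
-- Pre_solution restricts to square matrices, the task's natural domain: on ragged input A either raises
-- IndexError or compares only the leading n×n block, while B compares the full structure.


-- ===== PORT A =====
-- arr[i][j]; the default 0 is unreachable under Pre_solution (square matrix, indices from range(len(arr)))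
def pvCell (arr : List (List Int)) (i j : Int) : Int :=
  PySem.List.pyGetD (PySem.List.pyGetD arr i []) j 0

-- the inner 'for j in range(count)' loop with its break (break returns answer 0 immediately)
def pvInnerA (arr : List (List Int)) (i : Int) : List Int → Int → Int
  | [], answer => answer
  | j :: js, answer =>
      if pvCell arr i j = pvCell arr j i then pvInnerA arr i js answer else 0

-- the outer 'for i in range(count)' loop
def pvOuterA (arr : List (List Int)) : List Int → Int → Int
  | [], answer => answer
  | i :: is, answer => pvOuterA arr is (pvInnerA arr i (PySem.List.pyRange 0 arr.length 1) answer)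

def solution (arr : List (List Int)) : Int :=
  pvOuterA arr (PySem.List.pyRange 0 arr.length 1) 1

-- ===== PORT B =====
-- hand port of zip(*arr, strict=True) where it returns, i.e. on rows of equal length (then the min
-- of the row lengths is the common length and the getD default is never reached; zip(*[]) = []).
-- On unequal row lengths Python B raises ValueError — those inputs are outside Pre_solution.
def pvZipStar (arr : List (List Int)) : List (List Int) :=
  (List.range (((arr.map (·.length)).min?).getD 0)).map (fun k => arr.map (fun row => row.getD k 0))

def solution_alt (arr : List (List Int)) : Int :=
  let transposed := pvZipStar arr
  if arr = transposed then 1 else 0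

-- ===== PRECONDITION & SPEC =====
-- Pre_solution restricts to SQUARE matrices, the problem's natural domain: outside it A raises
-- IndexError on short rows, and on over-long rows A ignores the columns past n (see claim cites).
def Pre_solution (arr : List (List Int)) : Prop := ∀ row ∈ arr, row.length = arr.length
instance (arr : List (List Int)) : Decidable (Pre_solution arr) := by unfold Pre_solution; infer_instance
def pvWitness_solution : List (List Int) := [[1, 2], [2, 3]]

def Spec_solution (arr : List (List Int)) (out : Int) : Prop := out = solution_alt arr
instance (arr : List (List Int)) (out : Int) : Decidable (Spec_solution arr out) := by unfold Spec_solution; infer_instance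

-- ===== CLAIM (what is proved, stated in full; the proofs are below) =====
def Claim_equal_solution : Prop := ∀ (arr : List (List Int)), Dom_solution arr → Pre_solution arr → Spec_solution arr (solution arr)

-- ===== LEMMAS AND PROOFS =====

-- the inner loop returns answer iff every pair on row i matches, else 0
theorem pvInnerA_eq (arr : List (List Int)) (i : Int) (js : List Int) (answer : Int) :
    pvInnerA arr i js answer =
      if ∀ j ∈ js, pvCell arr i j = pvCell arr j i then answer else 0 := by
  induction js with
  | nil => simp [pvInnerA]
  | cons j js ih =>
      simp only [pvInnerA, ih, List.mem_cons]
      by_cases h : pvCell arr i j = pvCell arr j i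
      · simp [h]
      · simp [h]

theorem pvOuterA_eq (arr : List (List Int)) (is : List Int) (answer : Int) :
    pvOuterA arr is answer =
      if ∀ i ∈ is, ∀ j ∈ PySem.List.pyRange 0 arr.length 1, pvCell arr i j = pvCell arr j i
      then answer else 0 := by
  induction is generalizing answer with
  | nil => simp [pvOuterA]
  | cons i is ih =>
      rw [pvOuterA, ih, pvInnerA_eq]
      by_cases h1 : ∀ j ∈ PySem.List.pyRange 0 arr.length 1, pvCell arr i j = pvCell arr j i
      · by_cases h2 : ∀ a ∈ is, ∀ j ∈ PySem.List.pyRange 0 arr.length 1, pvCell arr a j = pvCell arr j a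
        · rw [if_pos h2, if_pos h1, if_pos (List.forall_mem_cons.mpr ⟨h1, h2⟩)]
        · rw [if_neg h2, if_neg (fun hc => h2 (List.forall_mem_cons.mp hc).2)]
      · by_cases h2 : ∀ a ∈ is, ∀ j ∈ PySem.List.pyRange 0 arr.length 1, pvCell arr a j = pvCell arr j a
        · rw [if_pos h2, if_neg h1, if_neg (fun hc => h1 (List.forall_mem_cons.mp hc).1)]
        · rw [if_neg h2, if_neg (fun hc => h2 (List.forall_mem_cons.mp hc).2)]

-- under squareness the min of the row lengths is the number of rows (also for arr = [])
-- min? of a nonempty constant list (no library lemma found for this shape)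
theorem pvMin?_replicate (n c : Nat) : (List.replicate (n + 1) c).min? = some c := by
  induction n with
  | zero => rfl
  | succ n ih =>
      rw [List.replicate_succ, List.min?_cons, ih]
      simp

-- under squareness the min of the row lengths is the number of rows (also for arr = [])
theorem pvMinLen (arr : List (List Int)) (hsq : Pre_solution arr) :
    ((arr.map (·.length)).min?).getD 0 = arr.length := by
  cases arr with
  | nil => rfl
  | cons r rs =>
      have hlen : (r :: rs).map (·.length) = List.replicate (rs.length + 1) ((r :: rs).length) := by
        rw [List.eq_replicate_iff]
        refine ⟨by simp, ?_⟩
        intro b hb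
        simp only [List.mem_map] at hb
        obtain ⟨row, hrow, hb⟩ := hb
        rw [← hb]
        exact hsq row hrow
      rw [hlen, pvMin?_replicate]
      rfl

theorem pvCell_eq (arr : List (List Int)) (i j : Nat) :
    pvCell arr (i : Int) (j : Int) = (arr.getD i []).getD j 0 := by
  simp [pvCell, PySem.List.pyGetD_natCast]

-- A = (1 iff leading-block symmetry); stated via Nat indices
theorem solutionA_char (arr : List (List Int)) :
    solution arr =
      if ∀ i < arr.length, ∀ j < arr.length, (arr.getD i []).getD j 0 = (arr.getD j []).getD i 0
      then 1 else 0 := by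
  rw [solution, pvOuterA_eq]
  congr 1
  simp only [eq_iff_iff]
  constructor
  · intro h i hi j hj
    have := h (i : Int) (by rw [PySem.List.mem_pyRange_one]; omega)
      (j : Int) (by rw [PySem.List.mem_pyRange_one]; omega)
    simpa [pvCell_eq] using this
  · intro h i hi j hj
    rw [PySem.List.mem_pyRange_one] at hi hj
    obtain ⟨i, rfl⟩ : ∃ k : Nat, i = (k : Int) := ⟨i.toNat, by omega⟩
    obtain ⟨j, rfl⟩ : ∃ k : Nat, j = (k : Int) := ⟨j.toNat, by omega⟩
    simp only [pvCell_eq]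
    exact h i (by exact_mod_cast hi.2) j (by exact_mod_cast hj.2)

-- B = (1 iff the same symmetry), under squareness
theorem pvEqTranspose_iff (arr : List (List Int)) (hsq : Pre_solution arr) :
    arr = pvZipStar arr ↔
      ∀ i < arr.length, ∀ j < arr.length, (arr.getD i []).getD j 0 = (arr.getD j []).getD i 0 := by
  unfold pvZipStar
  rw [pvMinLen arr hsq]
  constructor
  · intro h i hi j hj
    have hrow : arr.getD i [] = arr.map (fun row => row.getD i 0) := by
      conv_lhs => rw [h]
      rw [List.getD_eq_getElem _ _ (by simpa using hi)]
      simp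
    rw [hrow, List.getD_eq_getElem _ _ (by simpa using hj), List.getElem_map,
        List.getD_eq_getElem arr [] hj]
  · intro h
    apply List.ext_getElem (by simp)
    intro k hk1 hk2
    simp only [List.getElem_map, List.getElem_range]
    have hkl : k < arr.length := by simpa using hk2
    apply List.ext_getElem
    · simp [hsq arr[k] (List.getElem_mem hkl)]
    · intro i hi1 hi2
      have hil : i < arr.length := by simpa using hi2
      have hrl : i < arr[k].length := by rw [hsq arr[k] (List.getElem_mem hkl)]; exact hil
      rw [List.getElem_map]
      have hsym := h k hkl i hil
      rw [List.getD_eq_getElem _ _ hkl, List.getD_eq_getElem _ _ hil] at hsym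
      rw [← List.getD_eq_getElem _ _ hrl]
      exact hsym

-- ===== VERDICT (by name: the statement is the Claim_ definition above) =====
theorem solution_spec : Claim_equal_solution := by
  intro arr _ hsq
  show solution arr = solution_alt arr
  rw [solutionA_char]
  simp only [solution_alt]
  by_cases h : arr = pvZipStar arr
  · rw [if_pos ((pvEqTranspose_iff arr hsq).mp h), if_pos h]
  · rw [if_neg (fun hs => h ((pvEqTranspose_iff arr hsq).mpr hs)), if_neg h]
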